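-- pv_equiv track=rewrite | github.com/MrStub/dzdp-monitor | admin_api.py | _build_summary_from_targets
-- ===== SOURCE A (Python) =====
-- from typing import Any, Dict, List, Optional, Tuple
--
-- def _build_summary_from_targets(target_views: List[Dict[str, Any]]) -> Dict[str, Any]:
--     summary = {
--         "total_targets": len(target_views),
--         "in_stock": 0,
--         "sold_out": 0,
--         "unknown": 0,
--         "error_targets": 0,
--     }
--     for item in target_views:
--         state = str(item.get("last_state") or "UNKNOWN")
--         if state == "IN_STOCK":
--             summary["in_stock"] += 1
--         elif state == "SOLD_OUT":
--             summary["sold_out"] += 1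
--         else:
--             summary["unknown"] += 1
--         if item.get("last_error_text"):
--             summary["error_targets"] += 1
--     return summary
-- ===== SOURCE B (Python) =====
-- from typing import Any, Dict, List
--
--
-- def _build_summary_from_targets(target_views: List[Dict[str, Any]]) -> Dict[str, Any]:
--     # Frequency-table formulation: normalize all states up front, read the two
--     # named counts, derive `unknown` arithmetically, and count errors in its
--     # own pass -- no per-item branching.
--     states = [str(item.get("last_state") or "UNKNOWN") for item in target_views]
--     total = len(target_views)
--     in_stock = states.count("IN_STOCK")
--     sold_out = states.count("SOLD_OUT")
--     error_targets = sum(1 for item in target_views if item.get("last_error_text"))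
--     return {
--         "total_targets": total,
--         "in_stock": in_stock,
--         "sold_out": sold_out,
--         "unknown": total - in_stock - sold_out,
--         "error_targets": error_targets,
--     }
-- ===== Notes on version B (the rewrite author's own statement) =====
-- stated objective: idiomatic
-- what changed: Replaces the single branching accumulation loop by a normalize-then-count formulation: map all states once, read in_stock/sold_out with list.count, derive unknown by arithmetic (total - in_stock - sold_out), and count error targets in a separate comprehension pass.
import Mathlib
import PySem

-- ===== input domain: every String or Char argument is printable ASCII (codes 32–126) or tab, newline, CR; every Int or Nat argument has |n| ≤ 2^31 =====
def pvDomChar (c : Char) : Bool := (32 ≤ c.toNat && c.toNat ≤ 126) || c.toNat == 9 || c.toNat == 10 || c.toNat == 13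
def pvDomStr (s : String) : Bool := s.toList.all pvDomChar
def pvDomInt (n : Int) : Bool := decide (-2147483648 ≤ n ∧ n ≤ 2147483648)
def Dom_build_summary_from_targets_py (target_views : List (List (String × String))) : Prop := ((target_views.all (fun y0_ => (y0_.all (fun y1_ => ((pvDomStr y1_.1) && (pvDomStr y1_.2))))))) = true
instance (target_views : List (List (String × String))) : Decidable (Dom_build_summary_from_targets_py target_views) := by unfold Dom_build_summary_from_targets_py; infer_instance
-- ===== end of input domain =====

-- B replaces A's single branching loop with a map-then-count formulation
-- (states mapped once, unknown derived arithmetically, errors counted in a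
-- separate pass); objective: idiomatic. Same return value everywhere.

-- ===== PORT A =====
-- shared helpers for the two Python expressions both programs contain:
-- str(item.get("last_state") or "UNKNOWN")  (values are strs, so str() is identity;
-- `or` replaces a missing key or an empty -- falsy -- string by "UNKNOWN")
def pvState (item : List (String × String)) : String :=
  match (PySem.Dict.mk item).get? "last_state" with
  | none => "UNKNOWN"
  | some s => if s = "" then "UNKNOWN" else s

-- truthiness of item.get("last_error_text"): present with a non-empty string value
def pvErr (item : List (String × String)) : Bool :=
  match (PySem.Dict.mk item).get? "last_error_text" with
  | none => false
  | some s => s ≠ ""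

-- A's dict has five fixed, distinct keys; its four mutated counters are ported as an
-- Int 4-tuple threaded through the fold, and the dict is assembled at the end in
-- A's insertion order.
def build_summary_from_targets_py (target_views : List (List (String × String))) : List (String × Int) :=
  let r := target_views.foldl
    (fun (acc : Int × Int × Int × Int) item =>
      let (i, s, u, e) := acc
      let st := pvState item
      let (i, s, u) :=
        if st = "IN_STOCK" then (i + 1, s, u)
        else if st = "SOLD_OUT" then (i, s + 1, u)
        else (i, s, u + 1)
      let e := if pvErr item then e + 1 else e
      (i, s, u, e))
    (0, 0, 0, 0)
  [("total_targets", (target_views.length : Int)),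
   ("in_stock", r.1), ("sold_out", r.2.1),
   ("unknown", r.2.2.1), ("error_targets", r.2.2.2)]

-- ===== PORT B =====
def build_summary_from_targets_py_alt (target_views : List (List (String × String))) : List (String × Int) :=
  let states := target_views.map pvState
  let total : Int := target_views.length
  let in_stock : Int := PySem.List.count states "IN_STOCK"
  let sold_out : Int := PySem.List.count states "SOLD_OUT"
  -- sum(1 for item in target_views if item.get("last_error_text"))
  let error_targets : Int := (target_views.map (fun item => if pvErr item then (1 : Int) else 0)).sum
  [("total_targets", total),
   ("in_stock", in_stock), ("sold_out", sold_out),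
   ("unknown", total - in_stock - sold_out),
   ("error_targets", error_targets)]

-- ===== PRECONDITION & SPEC =====
def Spec_build_summary_from_targets_py (target_views : List (List (String × String))) (out : List (String × Int)) : Prop := out = build_summary_from_targets_py_alt target_views
instance (target_views : List (List (String × String))) (out : List (String × Int)) : Decidable (Spec_build_summary_from_targets_py target_views out) := by unfold Spec_build_summary_from_targets_py; infer_instance

-- ===== CLAIM (what is proved, stated in full; the proofs are below) =====
def Claim_equal_build_summary_from_targets_py : Prop := ∀ (target_views : List (List (String × String))), Dom_build_summary_from_targets_py target_views → Spec_build_summary_from_targets_py target_views (build_summary_from_targets_py target_views)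

-- ===== LEMMAS AND PROOFS =====

-- A's loop, run from an arbitrary accumulator, adds the per-bucket counts of B.
lemma pvFoldA (l : List (List (String × String))) (i s u e : Int) :
    l.foldl
      (fun (acc : Int × Int × Int × Int) item =>
        let (i, s, u, e) := acc
        let st := pvState item
        let (i, s, u) :=
          if st = "IN_STOCK" then (i + 1, s, u)
          else if st = "SOLD_OUT" then (i, s + 1, u)
          else (i, s, u + 1)
        let e := if pvErr item then e + 1 else e
        (i, s, u, e)) (i, s, u, e)
    = (i + PySem.List.count (l.map pvState) "IN_STOCK",
       s + PySem.List.count (l.map pvState) "SOLD_OUT",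
       u + ((l.length : Int)
            - PySem.List.count (l.map pvState) "IN_STOCK"
            - PySem.List.count (l.map pvState) "SOLD_OUT"),
       e + (l.map (fun item => if pvErr item then (1 : Int) else 0)).sum) := by
  induction l generalizing i s u e with
  | nil => simp [PySem.List.count]
  | cons x xs ih =>
    simp only [List.foldl_cons, List.map_cons, List.sum_cons, PySem.List.count, List.count_cons]
    by_cases h1 : pvState x = "IN_STOCK" <;> by_cases h2 : pvState x = "SOLD_OUT" <;>
      by_cases h3 : pvErr x = true <;>
      simp_all [ih, PySem.List.count] <;> (try (push_cast; ring)) <;> simp_all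

-- ===== VERDICT (by name: the statement is the Claim_ definition above) =====
theorem build_summary_from_targets_py_spec : Claim_equal_build_summary_from_targets_py := by
  intro tv _
  unfold Spec_build_summary_from_targets_py build_summary_from_targets_py build_summary_from_targets_py_alt
  simp only [pvFoldA, zero_add]
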